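-- pv_equiv track=rewrite | github.com/6ixmindslabs-hue/ATTENDANCE-SYSTEM | backend/main.py | summarize_faculty_session
-- ===== SOURCE A (Python) =====
-- from typing import Iterable, Optional
--
-- PRESENT_STATUSES = {"present", "late"}
--
-- def normalize_status(status_value: Optional[str]) -> str:
--     return (status_value or "").strip().lower()
--
-- def is_presentish(status_value: str) -> bool:
--     return normalize_status(status_value) in PRESENT_STATUSES
--
-- def summarize_faculty_session(rows: list[dict], session_key: str) -> dict:
--     summary = {
--         "present": 0,
--         "absent": 0,
--         "pending": 0,
--         "no_session": 0,
--     }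
--
--     for row in rows:
--         status_value = normalize_status(row.get(session_key))
--         if is_presentish(status_value):
--             summary["present"] += 1
--         elif status_value == "absent":
--             summary["absent"] += 1
--         elif status_value == "pending":
--             summary["pending"] += 1
--         else:
--             summary["no_session"] += 1
--
--     return summary
-- ===== SOURCE B (Python) =====
-- def summarize_faculty_session(rows: list[dict], session_key: str) -> dict:
--     tally = {}
--     for row in rows:
--         s = (row.get(session_key) or "").strip().lower()
--         tally[s] = tally.get(s, 0) + 1
--     present = tally.get("present", 0) + tally.get("late", 0)
--     absent = tally.get("absent", 0)
--     pending = tally.get("pending", 0)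
--     return {
--         "present": present,
--         "absent": absent,
--         "pending": pending,
--         "no_session": len(rows) - present - absent - pending,
--     }
-- ===== Notes on version B (the rewrite author's own statement) =====
-- stated objective: simpler
-- what changed: Replaces the per-row if/elif branching into four named buckets by one tally pass into a frequency dict of normalized statuses, then derives the summary (present = present+late tallies, no_session = total minus the categorized counts).
import Mathlib
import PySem

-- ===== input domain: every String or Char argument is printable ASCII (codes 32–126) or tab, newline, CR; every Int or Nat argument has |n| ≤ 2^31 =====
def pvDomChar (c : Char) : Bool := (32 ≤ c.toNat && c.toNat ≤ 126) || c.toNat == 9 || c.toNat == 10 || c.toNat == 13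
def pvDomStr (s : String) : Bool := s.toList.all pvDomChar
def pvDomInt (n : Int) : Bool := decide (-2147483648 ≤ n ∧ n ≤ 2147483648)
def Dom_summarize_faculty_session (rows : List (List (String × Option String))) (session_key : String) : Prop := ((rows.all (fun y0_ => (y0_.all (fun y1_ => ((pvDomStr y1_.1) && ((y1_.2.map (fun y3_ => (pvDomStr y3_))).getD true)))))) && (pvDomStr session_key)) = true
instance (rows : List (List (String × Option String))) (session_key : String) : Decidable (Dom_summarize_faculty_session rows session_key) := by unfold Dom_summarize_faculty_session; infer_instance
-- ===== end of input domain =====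

-- B replaces A's per-row if/elif branching into four buckets by one tally pass into a
-- frequency dict of normalized statuses and then derives the summary from it (objective: simpler).

-- ===== PORT A =====
def pvNormalizeStatus (status_value : Option String) : String :=
  PySem.Str.lower (PySem.Str.strip (status_value.getD ""))

def pvPRESENT_STATUSES : List String := PySem.Set.ofList ["present", "late"]

def pvIsPresentish (status_value : String) : Bool :=
  pvPRESENT_STATUSES.contains (pvNormalizeStatus (some status_value))

def summarize_faculty_session (rows : List (List (String × Option String))) (session_key : String) : List (String × Int) :=
  let summary : PySem.Dict String Int :=
    PySem.Dict.ofList [("present", 0), ("absent", 0), ("pending", 0), ("no_session", 0)]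
  let summary := rows.foldl (fun summary row =>
    let status_value := pvNormalizeStatus (((PySem.Dict.mk row).get? session_key).getD none)
    if pvIsPresentish status_value then summary.modify "present" 0 (· + 1)
    else if status_value == "absent" then summary.modify "absent" 0 (· + 1)
    else if status_value == "pending" then summary.modify "pending" 0 (· + 1)
    else summary.modify "no_session" 0 (· + 1)) summary
  summary.items

-- ===== PORT B =====
def pvNormKey (row : List (String × Option String)) (session_key : String) : String :=
  PySem.Str.lower (PySem.Str.strip ((((PySem.Dict.mk row).get? session_key).getD none).getD ""))

def summarize_faculty_session_alt (rows : List (List (String × Option String))) (session_key : String) : List (String × Int) :=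
  let tally : PySem.Dict String Int :=
    rows.foldl (fun d row =>
      let s := pvNormKey row session_key
      d.insert s (d.getD s 0 + 1)) PySem.Dict.empty
  let present := tally.getD "present" 0 + tally.getD "late" 0
  let absent := tally.getD "absent" 0
  let pending := tally.getD "pending" 0
  [("present", present), ("absent", absent), ("pending", pending),
   ("no_session", (rows.length : Int) - present - absent - pending)]

-- ===== PRECONDITION & SPEC =====
def Spec_summarize_faculty_session (rows : List (List (String × Option String))) (session_key : String) (out : List (String × Int)) : Prop := out = summarize_faculty_session_alt rows session_key
instance (rows : List (List (String × Option String))) (session_key : String) (out : List (String × Int)) : Decidable (Spec_summarize_faculty_session rows session_key out) := by unfold Spec_summarize_faculty_session; infer_instance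

-- ===== CLAIM (what is proved, stated in full; the proofs are below) =====
def Claim_equal_summarize_faculty_session : Prop := ∀ (rows : List (List (String × Option String))) (session_key : String), Dom_summarize_faculty_session rows session_key → Spec_summarize_faculty_session rows session_key (summarize_faculty_session rows session_key)

-- ===== LEMMAS AND PROOFS =====

-- lowering a character never changes whether it is whitespace
theorem pv_isspace_lowerChar (c : Char) :
    PySem.Chars.isspace (PySem.Chars.lowerChar c) = PySem.Chars.isspace c := by
  unfold PySem.Chars.lowerChar
  split_ifs with h
  · unfold PySem.Chars.isupper at h
    have h1 : 65 ≤ c.toNat := by simpa using (Bool.and_elim_left h : decide ('A' ≤ c) = true)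
    have h2 : c.toNat ≤ 90 := by simpa using (Bool.and_elim_right h : decide (c ≤ 'Z') = true)
    unfold PySem.Chars.isspace
    set n := c.toNat with hn
    clear_value n
    interval_cases n <;> decide
  · rfl

theorem pv_lowerChar_lowerChar (c : Char) :
    PySem.Chars.lowerChar (PySem.Chars.lowerChar c) = PySem.Chars.lowerChar c := by
  by_cases h : PySem.Chars.isupper c = true
  · have h1 : 65 ≤ c.toNat := by
      unfold PySem.Chars.isupper at h
      simpa using (Bool.and_elim_left h : decide ('A' ≤ c) = true)
    have h2 : c.toNat ≤ 90 := by
      unfold PySem.Chars.isupper at h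
      simpa using (Bool.and_elim_right h : decide (c ≤ 'Z') = true)
    unfold PySem.Chars.lowerChar
    rw [if_pos h]
    have hno : PySem.Chars.isupper (Char.ofNat (c.toNat + 32)) = false := by
      unfold PySem.Chars.isupper
      set n := c.toNat with hn
      clear_value n
      interval_cases n <;> decide
    rw [if_neg (by simp [hno])]
  · unfold PySem.Chars.lowerChar
    simp [h]

theorem pv_lower_lower (cs : List Char) :
    PySem.Chars.lower (PySem.Chars.lower cs) = PySem.Chars.lower cs := by
  simp [PySem.Chars.lower, List.map_map, Function.comp_def, pv_lowerChar_lowerChar]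

theorem pv_lstrip_lower (cs : List Char) :
    PySem.Chars.lstrip (PySem.Chars.lower cs) = PySem.Chars.lower (PySem.Chars.lstrip cs) := by
  simp [PySem.Chars.lstrip, PySem.Chars.lower, List.dropWhile_map, Function.comp_def,
    pv_isspace_lowerChar]

theorem pv_rstrip_lower (cs : List Char) :
    PySem.Chars.rstrip (PySem.Chars.lower cs) = PySem.Chars.lower (PySem.Chars.rstrip cs) := by
  simp [PySem.Chars.rstrip, PySem.Chars.lower, ← List.map_reverse, List.dropWhile_map,
    Function.comp_def, pv_isspace_lowerChar]

theorem pv_strip_lower (cs : List Char) :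
    PySem.Chars.strip (PySem.Chars.lower cs) = PySem.Chars.lower (PySem.Chars.strip cs) := by
  simp [PySem.Chars.strip, pv_lstrip_lower, pv_rstrip_lower]

theorem pv_lstrip_rstrip_lstrip (cs : List Char) :
    PySem.Chars.lstrip (PySem.Chars.rstrip (PySem.Chars.lstrip cs))
      = PySem.Chars.rstrip (PySem.Chars.lstrip cs) := by
  set u := PySem.Chars.lstrip cs with hu
  have hul : PySem.Chars.lstrip u = u := by
    simp [hu, PySem.Chars.lstrip, List.dropWhile_idempotent]
  have hpre : PySem.Chars.rstrip u <+: u := by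
    have := List.dropWhile_suffix (l := u.reverse) (p := PySem.Chars.isspace)
    have h2 : (List.dropWhile PySem.Chars.isspace u.reverse).reverse <+: u.reverse.reverse :=
      List.reverse_prefix.mpr this
    simpa [PySem.Chars.rstrip] using h2
  rw [PySem.Chars.lstrip, List.dropWhile_eq_self_iff]
  intro hl
  have hu0 : 0 < u.length := lt_of_lt_of_le hl hpre.length_le
  have hget : (PySem.Chars.rstrip u)[0] = u[0] := List.IsPrefix.getElem hpre _
  rw [hget]
  have := (List.dropWhile_eq_self_iff).mp hul hu0
  simpa [PySem.Chars.lstrip] using this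

theorem pv_strip_strip (cs : List Char) :
    PySem.Chars.strip (PySem.Chars.strip cs) = PySem.Chars.strip cs := by
  show PySem.Chars.rstrip (PySem.Chars.lstrip (PySem.Chars.rstrip (PySem.Chars.lstrip cs)))
      = PySem.Chars.rstrip (PySem.Chars.lstrip cs)
  rw [pv_lstrip_rstrip_lstrip]
  simp [PySem.Chars.rstrip, List.dropWhile_idempotent]

theorem pv_norm_chars_idem (cs : List Char) :
    PySem.Chars.lower (PySem.Chars.strip (PySem.Chars.lower (PySem.Chars.strip cs)))
      = PySem.Chars.lower (PySem.Chars.strip cs) := by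
  rw [pv_strip_lower, pv_strip_strip, pv_lower_lower]

theorem pv_norm_idem (s : String) :
    PySem.Str.lower (PySem.Str.strip (PySem.Str.lower (PySem.Str.strip s)))
      = PySem.Str.lower (PySem.Str.strip s) := by
  unfold PySem.Str.lower PySem.Str.strip
  simp only [String.toList_ofList]
  rw [pv_norm_chars_idem]

-- the status a row contributes (shared shape of both ports' per-row computation)
def pvRowStatus (session_key : String) (row : List (String × Option String)) : String :=
  pvNormalizeStatus (((PySem.Dict.mk row).get? session_key).getD none)

theorem pv_presentish_norm (v : Option String) :
    pvIsPresentish (pvNormalizeStatus v)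
      = ((pvNormalizeStatus v == "present") || (pvNormalizeStatus v == "late")) := by
  unfold pvIsPresentish
  have h : pvNormalizeStatus (some (pvNormalizeStatus v)) = pvNormalizeStatus v := by
    unfold pvNormalizeStatus
    simpa using pv_norm_idem (v.getD "")
  rw [h]
  have hp : pvPRESENT_STATUSES = ["present", "late"] := by decide
  rw [hp]
  simp [Bool.or_comm, Bool.beq_eq_decide_eq]

-- A's loop over an arbitrary 4-bucket accumulator
theorem pvA_loop (session_key : String) (rows : List (List (String × Option String)))
    (a b c d : Int) :
    rows.foldl (fun summary row =>
        let status_value := pvNormalizeStatus (((PySem.Dict.mk row).get? session_key).getD none)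
        if pvIsPresentish status_value then summary.modify "present" 0 (· + 1)
        else if status_value == "absent" then summary.modify "absent" 0 (· + 1)
        else if status_value == "pending" then summary.modify "pending" 0 (· + 1)
        else summary.modify "no_session" 0 (· + 1))
      (PySem.Dict.mk [("present", a), ("absent", b), ("pending", c), ("no_session", d)])
    = PySem.Dict.mk
        [("present", a + (rows.countP (fun r => pvIsPresentish (pvRowStatus session_key r)) : Int)),
         ("absent", b + (rows.countP (fun r => !(pvIsPresentish (pvRowStatus session_key r)) && (pvRowStatus session_key r == "absent")) : Int)),
         ("pending", c + (rows.countP (fun r => !(pvIsPresentish (pvRowStatus session_key r)) && !(pvRowStatus session_key r == "absent") && (pvRowStatus session_key r == "pending")) : Int)),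
         ("no_session", d + (rows.countP (fun r => !(pvIsPresentish (pvRowStatus session_key r)) && !(pvRowStatus session_key r == "absent") && !(pvRowStatus session_key r == "pending")) : Int))] := by
  induction rows generalizing a b c d with
  | nil => simp
  | cons r t ih =>
    simp only [List.foldl_cons, List.countP_cons, pvRowStatus]
    by_cases h1 : pvIsPresentish (pvNormalizeStatus (((PySem.Dict.mk r).get? session_key).getD none)) = true
    · rw [if_pos h1]
      have hm : (PySem.Dict.mk [("present", a), ("absent", b), ("pending", c), ("no_session", d)]).modify "present" 0 (· + 1)
          = PySem.Dict.mk [("present", a + 1), ("absent", b), ("pending", c), ("no_session", d)] := by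
        simp [PySem.Dict.modify, PySem.Dict.getD, PySem.Dict.get?, PySem.Dict.insert, PySem.Dict.contains]
      rw [hm, ih]
      simp only [pvRowStatus]
      simp [h1]
      omega
    · rw [if_neg h1]
      rw [Bool.not_eq_true] at h1
      by_cases h2 : (pvNormalizeStatus (((PySem.Dict.mk r).get? session_key).getD none) == "absent") = true
      · rw [if_pos h2]
        have hm : (PySem.Dict.mk [("present", a), ("absent", b), ("pending", c), ("no_session", d)]).modify "absent" 0 (· + 1)
            = PySem.Dict.mk [("present", a), ("absent", b + 1), ("pending", c), ("no_session", d)] := by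
          simp [PySem.Dict.modify, PySem.Dict.getD, PySem.Dict.get?, PySem.Dict.insert, PySem.Dict.contains]
        rw [hm, ih]
        simp only [pvRowStatus]
        simp [h1, h2]
        omega
      · rw [if_neg h2]
        rw [Bool.not_eq_true] at h2
        by_cases h3 : (pvNormalizeStatus (((PySem.Dict.mk r).get? session_key).getD none) == "pending") = true
        · rw [if_pos h3]
          have hm : (PySem.Dict.mk [("present", a), ("absent", b), ("pending", c), ("no_session", d)]).modify "pending" 0 (· + 1)
              = PySem.Dict.mk [("present", a), ("absent", b), ("pending", c + 1), ("no_session", d)] := by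
            simp [PySem.Dict.modify, PySem.Dict.getD, PySem.Dict.get?, PySem.Dict.insert, PySem.Dict.contains]
          rw [hm, ih]
          simp only [pvRowStatus]
          simp [h1, h2, h3]
          omega
        · rw [if_neg h3]
          rw [Bool.not_eq_true] at h3
          have hm : (PySem.Dict.mk [("present", a), ("absent", b), ("pending", c), ("no_session", d)]).modify "no_session" 0 (· + 1)
              = PySem.Dict.mk [("present", a), ("absent", b), ("pending", c), ("no_session", d + 1)] := by
            simp [PySem.Dict.modify, PySem.Dict.getD, PySem.Dict.get?, PySem.Dict.insert, PySem.Dict.contains]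
          rw [hm, ih]
          simp only [pvRowStatus]
          simp [h1, h2, h3]
          omega

theorem pv_partition (session_key : String) (rows : List (List (String × Option String))) :
    rows.countP (fun r => pvIsPresentish (pvRowStatus session_key r))
    + rows.countP (fun r => !(pvIsPresentish (pvRowStatus session_key r)) && (pvRowStatus session_key r == "absent"))
    + rows.countP (fun r => !(pvIsPresentish (pvRowStatus session_key r)) && !(pvRowStatus session_key r == "absent") && (pvRowStatus session_key r == "pending"))
    + rows.countP (fun r => !(pvIsPresentish (pvRowStatus session_key r)) && !(pvRowStatus session_key r == "absent") && !(pvRowStatus session_key r == "pending"))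
    = rows.length := by
  induction rows with
  | nil => simp
  | cons r t ih =>
    simp only [List.countP_cons, List.length_cons]
    by_cases h1 : pvIsPresentish (pvRowStatus session_key r) = true <;>
      by_cases h2 : (pvRowStatus session_key r == "absent") = true <;>
      by_cases h3 : (pvRowStatus session_key r == "pending") = true <;>
      simp [h1, h2, h3] <;> omega

theorem pv_count_present (ks : List String) :
    List.countP (fun s => (s == "present") || (s == "late")) ks
      = ks.count "present" + ks.count "late" := by
  induction ks with
  | nil => simp
  | cons s t ih =>
    simp only [List.countP_cons, List.count_cons, ih]
    by_cases h1 : s = "present"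
    · simp [h1]
      omega
    · by_cases h2 : s = "late" <;> simp [h1, h2]
      omega

theorem pv_count_absent (ks : List String) :
    List.countP (fun s => !((s == "present") || (s == "late")) && (s == "absent")) ks
      = ks.count "absent" := by
  induction ks with
  | nil => simp
  | cons s t ih =>
    simp only [List.countP_cons, List.count_cons, ih]
    by_cases h : s = "absent" <;> simp [h]

theorem pv_count_pending (ks : List String) :
    List.countP (fun s => !((s == "present") || (s == "late")) && !(s == "absent") && (s == "pending")) ks
      = ks.count "pending" := by
  induction ks with
  | nil => simp
  | cons s t ih =>
    simp only [List.countP_cons, List.count_cons, ih]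
    by_cases h : s = "pending" <;> simp [h]

-- ===== VERDICT (by name: the statement is the Claim_ definition above) =====
theorem summarize_faculty_session_spec : Claim_equal_summarize_faculty_session := by
  intro rows session_key _
  unfold Spec_summarize_faculty_session
  unfold summarize_faculty_session summarize_faculty_session_alt
  dsimp only
  have hinit : (PySem.Dict.ofList [("present", (0:Int)), ("absent", 0), ("pending", 0), ("no_session", 0)]) = PySem.Dict.mk [("present", 0), ("absent", 0), ("pending", 0), ("no_session", 0)] := by rfl
  rw [hinit, pvA_loop]
  have hfold : List.foldl (fun (d : PySem.Dict String Int) row => d.insert (pvNormKey row session_key) (d.getD (pvNormKey row session_key) 0 + 1)) PySem.Dict.empty rows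
      = PySem.Dict.counter (rows.map (fun row => pvNormKey row session_key)) := by
    rw [← PySem.Dict.foldl_insert_getD_add_one_eq_counter, List.foldl_map]
  rw [hfold]
  simp only [PySem.Dict.getD_counter]
  have hrk : ∀ row, pvRowStatus session_key row = pvNormKey row session_key := fun _ => rfl
  have hpk : ∀ row, pvIsPresentish (pvNormKey row session_key) = ((pvNormKey row session_key == "present") || (pvNormKey row session_key == "late")) :=
    fun row => pv_presentish_norm (((PySem.Dict.mk row).get? session_key).getD none)
  simp only [hrk, hpk]
  have e1 : List.countP (fun r => ((pvNormKey r session_key == "present") || (pvNormKey r session_key == "late"))) rows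
      = (rows.map (fun row => pvNormKey row session_key)).count "present" + (rows.map (fun row => pvNormKey row session_key)).count "late" := by
    rw [← pv_count_present, List.countP_map]
    simp only [Function.comp_def]
  have e2 : List.countP (fun r => !((pvNormKey r session_key == "present") || (pvNormKey r session_key == "late")) && (pvNormKey r session_key == "absent")) rows
      = (rows.map (fun row => pvNormKey row session_key)).count "absent" := by
    rw [← pv_count_absent, List.countP_map]
    simp only [Function.comp_def]
  have e3 : List.countP (fun r => !((pvNormKey r session_key == "present") || (pvNormKey r session_key == "late")) && !(pvNormKey r session_key == "absent") && (pvNormKey r session_key == "pending")) rows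
      = (rows.map (fun row => pvNormKey row session_key)).count "pending" := by
    rw [← pv_count_pending, List.countP_map]
    simp only [Function.comp_def]
  have hP := pv_partition session_key rows
  simp only [hrk, hpk] at hP
  rw [e1, e2, e3] at hP
  simp only [e1, e2, e3]
  simp only [List.cons.injEq, Prod.mk.injEq]
  and_intros <;> first
    | rfl
    | (push_cast; try omega)
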